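-- pv_equiv track=rewrite | github.com/Cezari0o/Gerador-Assinaturas-RSA | utility.py | get_columns_form
-- ===== SOURCE A (Python) =====
-- def get_columns_form(vector, row_size):
--
--     mat_size = row_size
--     matrix = []
--     for i in range(mat_size):
--         matrix.append([])
--     for idx, item in enumerate(vector):
--         matrix[(idx % mat_size)].append(item)
--
--     return matrix
-- ===== SOURCE B (Python) =====
-- def get_columns_form(vector, row_size):
--     # Gather each row directly: row i holds the elements at positions
--     # i, i + row_size, i + 2*row_size, ... (the indices congruent to i).
--     n = len(vector)
--     return [[vector[j] for j in range(i, n, row_size)] for i in range(row_size)]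
-- ===== Notes on version B (the rewrite author's own statement) =====
-- stated objective: idiomatic
-- what changed: B gathers each row with one comprehension per residue class instead of A's pre-allocating empty rows and scattering elements into them by index modulo; Pre_ excludes non-positive row_size with a non-empty vector, where A raises (ZeroDivisionError for 0, IndexError for negative) while B returns [].
import Mathlib
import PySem

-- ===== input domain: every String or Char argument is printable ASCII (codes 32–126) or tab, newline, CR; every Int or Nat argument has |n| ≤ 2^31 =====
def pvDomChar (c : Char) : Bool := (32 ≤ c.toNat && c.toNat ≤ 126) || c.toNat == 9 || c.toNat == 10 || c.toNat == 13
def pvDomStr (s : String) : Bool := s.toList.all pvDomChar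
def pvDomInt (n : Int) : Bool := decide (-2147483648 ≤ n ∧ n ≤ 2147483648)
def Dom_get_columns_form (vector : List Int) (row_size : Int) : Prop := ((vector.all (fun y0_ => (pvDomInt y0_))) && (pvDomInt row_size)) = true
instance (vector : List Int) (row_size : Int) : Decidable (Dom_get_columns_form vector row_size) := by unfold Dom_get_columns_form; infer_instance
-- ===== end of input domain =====

-- B gathers each row directly by stepping through the indices i, i+row_size, i+2*row_size, …
-- instead of A's scatter into pre-allocated empty rows; equivalence is claimed where A
-- returns (Pre_ below).

-- ===== PORT A =====
def get_columns_form (vector : List Int) (row_size : Int) : List (List Int) :=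
  let mat_size := row_size
  let matrix : List (List Int) :=
    (PySem.List.pyRange 0 mat_size 1).foldl (fun m _ => m ++ [[]]) []
  (PySem.List.enumerate vector 0).foldl
    (fun m p =>
      let j := PySem.Int.mod p.1 mat_size
      m.set j.toNat ((m.getD j.toNat []) ++ [p.2])) matrix

-- ===== PORT B =====
def get_columns_form_alt (vector : List Int) (row_size : Int) : List (List Int) :=
  let n := (vector.length : Int)
  (PySem.List.pyRange 0 row_size 1).map (fun i =>
    (PySem.List.pyRange i n row_size).map (fun j => PySem.List.pyGetD vector j 0))

-- ===== PRECONDITION & SPEC =====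
-- Pre_ excludes exactly the inputs where A raises: non-positive row_size with a
-- non-empty vector (ZeroDivisionError for 0, IndexError for negative row_size).
def Pre_get_columns_form (vector : List Int) (row_size : Int) : Prop :=
  0 < row_size ∨ vector = []
instance (vector : List Int) (row_size : Int) : Decidable (Pre_get_columns_form vector row_size) := by unfold Pre_get_columns_form; infer_instance

def pvWitness_get_columns_form : List Int × Int := ([1, 2, 3, 4, 5], 2)

def Spec_get_columns_form (vector : List Int) (row_size : Int) (out : List (List Int)) : Prop := out = get_columns_form_alt vector row_size
instance (vector : List Int) (row_size : Int) (out : List (List Int)) : Decidable (Spec_get_columns_form vector row_size out) := by unfold Spec_get_columns_form; infer_instance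

-- ===== CLAIM (what is proved, stated in full; the proofs are below) =====
def Claim_equal_get_columns_form : Prop := ∀ (vector : List Int) (row_size : Int), Dom_get_columns_form vector row_size → Pre_get_columns_form vector row_size → Spec_get_columns_form vector row_size (get_columns_form vector row_size)

-- ===== LEMMAS AND PROOFS =====

-- the elements of vector whose position is ≡ i (mod n), in order: the common shape
-- both ports are reduced to
def bucketRow (vector : List Int) (n i : Int) : List Int :=
  (PySem.List.enumerate vector 0).filterMap
    (fun p => if PySem.Int.mod p.1 n = i then some p.2 else none)

theorem mod_nonneg_lt (a n : Int) (hn : 0 < n) :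
    0 ≤ PySem.Int.mod a n ∧ PySem.Int.mod a n < n := by
  rw [PySem.Int.mod_eq_emod_of_pos hn]
  exact ⟨Int.emod_nonneg a (by omega), Int.emod_lt_of_pos a hn⟩

-- closed form of a positive-step non-empty range
theorem pyRange_pos_lt_eq {a b st : Int} (hst : 0 < st) (hab : a < b) :
    PySem.List.pyRange a b st
      = (List.range ((b - a + st - 1) / st).toNat).map (fun k : Nat => a + st * (k : Int)) := by
  unfold PySem.List.pyRange
  rw [if_neg (by omega : ¬ st = 0)]
  simp only [if_pos hst, if_pos hab]

theorem pyRange_pos_eq_nil {a b st : Int} (hst : 0 < st) (hba : b ≤ a) :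
    PySem.List.pyRange a b st = [] := by
  unfold PySem.List.pyRange
  rw [if_neg (by omega : ¬ st = 0)]
  simp only [if_pos hst]
  rw [if_neg (by omega : ¬ a < b)]
  simp

-- a positive-step range stays within [a, b)
theorem mem_pyRange_pos_step {x a b st : Int} (hst : 0 < st)
    (hx : x ∈ PySem.List.pyRange a b st) : a ≤ x ∧ x < b := by
  by_cases hab : a < b
  · rw [pyRange_pos_lt_eq hst hab] at hx
    simp only [List.mem_map, List.mem_range] at hx
    obtain ⟨k, hk, rfl⟩ := hx
    set c : Int := (b - a + st - 1) / st with hc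
    have hc0 : 0 ≤ c := Int.ediv_nonneg (by omega) (by omega)
    have hkc : (k : Int) < c := by
      have h1 : (k : Int) < (c.toNat : Int) := by exact_mod_cast hk
      rwa [Int.toNat_of_nonneg hc0] at h1
    have hcb : c * st ≤ b - a + st - 1 := Int.ediv_mul_le _ (by omega)
    have hkb : st * (k : Int) ≤ st * (c - 1) :=
      mul_le_mul_of_nonneg_left (by omega) (by omega)
    have h0 : 0 ≤ st * (k : Int) := mul_nonneg (le_of_lt hst) (Int.natCast_nonneg k)
    exact ⟨by linarith, by linarith [mul_comm c st]⟩
  · rw [pyRange_pos_eq_nil hst (by omega)] at hx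
    simp at hx

-- one scatter step on a matrix given row-wise as a map over pyRange 0 n 1
theorem step_map_pyRange (n : Int) (f : Int → List Int) (j : Int)
    (hj0 : 0 ≤ j) (x : Int) :
    ((PySem.List.pyRange 0 n 1).map f).set j.toNat
        ((((PySem.List.pyRange 0 n 1).map f).getD j.toNat []) ++ [x])
      = (PySem.List.pyRange 0 n 1).map (fun i => f i ++ if j = i then [x] else []) := by
  have hget : ∀ (k : Nat) (hk : k < (PySem.List.pyRange 0 n 1).length),
      (PySem.List.pyRange 0 n 1)[k] = (k : Int) := by
    intro k hk
    simp [PySem.List.getElem_pyRange_one 0 n k hk]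
  apply List.ext_getElem
  · simp
  · intro k h1 h2
    have hk : k < (PySem.List.pyRange 0 n 1).length := by simpa using h1
    by_cases hkj : k = j.toNat
    · subst hkj
      rw [List.getElem_set_self (by simpa using hk)]
      have hD : (((PySem.List.pyRange 0 n 1).map f).getD j.toNat []) = f (j.toNat : Int) := by
        rw [List.getD_eq_getElem _ _ (by simpa using hk)]
        simp [hget j.toNat hk]
      rw [hD]
      rw [List.getElem_map, hget j.toNat hk]
      have hjj : j = (j.toNat : Int) := by omega
      simp [← hjj]
    · rw [List.getElem_set_ne (by omega)]
      rw [List.getElem_map, List.getElem_map, hget k hk]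
      have : j ≠ (k : Int) := by omega
      simp [this]

-- appending one element changes exactly the bucket of its position
theorem bucketRow_append (xs : List Int) (x : Int) (n i : Int) :
    bucketRow (xs ++ [x]) n i
      = bucketRow xs n i
        ++ if PySem.Int.mod (xs.length : Int) n = i then [x] else [] := by
  unfold bucketRow
  rw [PySem.List.enumerate_append]
  simp only [PySem.List.enumerate_cons, PySem.List.enumerate_nil, List.filterMap_append,
    List.filterMap_cons, List.filterMap_nil, zero_add]
  congr 1
  by_cases h : PySem.Int.mod (xs.length : Int) n = i <;> simp [h]

-- A equals the matrix of buckets, by induction on the vector from the right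
theorem a_eq_bucket (n : Int) (hn : 0 < n) (vector : List Int) :
    get_columns_form vector n = (PySem.List.pyRange 0 n 1).map (bucketRow vector n) := by
  induction vector using List.reverseRecOn with
  | nil =>
      have hrow : ∀ i, bucketRow ([] : List Int) n i = [] := by
        intro i
        simp [bucketRow, PySem.List.enumerate]
      rw [List.map_congr_left (fun i _ => hrow i)]
      simp [get_columns_form, PySem.List.enumerate, PySem.List.length_pyRange_one]
  | append_singleton xs x ih =>
      have hmod := mod_nonneg_lt (xs.length : Int) n hn
      have henum : PySem.List.enumerate (xs ++ [x]) 0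
          = PySem.List.enumerate xs 0 ++ [((xs.length : Int), x)] := by
        rw [PySem.List.enumerate_append]
        simp [PySem.List.enumerate_cons, PySem.List.enumerate_nil]
      have hA : get_columns_form (xs ++ [x]) n
          = (get_columns_form xs n).set (PySem.Int.mod (xs.length : Int) n).toNat
              (((get_columns_form xs n).getD (PySem.Int.mod (xs.length : Int) n).toNat []) ++ [x]) := by
        simp only [get_columns_form, henum, List.foldl_append, List.foldl_cons, List.foldl_nil]
      rw [hA, ih]
      rw [step_map_pyRange n (bucketRow xs n) (PySem.Int.mod (xs.length : Int) n) hmod.1 x]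
      apply List.map_congr_left
      intro i _
      rw [bucketRow_append]

-- extending the stop bound by one appends the new index exactly when it is in the class
theorem pyRange_step_snoc (i N n : Int) (hn : 0 < n) (hi : 0 ≤ i) (hin : i < n)
    (hN : 0 ≤ N) :
    PySem.List.pyRange i (N + 1) n
      = PySem.List.pyRange i N n
        ++ if PySem.Int.mod N n = i then [N] else [] := by
  have hmodN : PySem.Int.mod N n = N % n := PySem.Int.mod_eq_emod_of_pos hn
  by_cases hiN : i ≤ N
  · have hdecomp : n * ((N - i) / n) + (N - i) % n = N - i := Int.ediv_add_emod _ _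
    set q : Int := (N - i) / n with hq
    set s : Int := (N - i) % n with hs
    have hs0 : 0 ≤ s := Int.emod_nonneg _ (by omega)
    have hsn : s < n := Int.emod_lt_of_pos _ hn
    have hq0 : 0 ≤ q := Int.ediv_nonneg (by omega) (by omega)
    have hnq : 0 ≤ n * q := mul_nonneg (by omega) hq0
    have hiff : PySem.Int.mod N n = i ↔ s = 0 := by
      rw [hmodN]
      constructor
      · intro h
        have h2 : n * (N / n) + N % n = N := Int.ediv_add_emod _ _
        have h1 : N - i = n * (N / n) := by linarith
        rw [hs, h1]
        exact Int.mul_emod_right n (N / n)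
      · intro h
        have h1 : N = i + n * q := by linarith
        rw [h1, Int.add_mul_emod_self_left]
        exact Int.emod_eq_of_lt hi hin
    by_cases hsz : s = 0
    · rw [if_pos (hiff.mpr hsz)]
      by_cases hlt : i < N
      · rw [pyRange_pos_lt_eq hn (by omega : i < N + 1), pyRange_pos_lt_eq hn hlt]
        have hC1 : ((N - i + n - 1) / n).toNat = q.toNat := by
          have e : N - i + n - 1 = (n - 1) + n * q := by linarith
          rw [e, Int.add_mul_ediv_left _ _ (by omega : n ≠ 0),
            Int.ediv_eq_zero_of_lt (by omega) (by omega)]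
          simp
        have hC2 : ((N + 1 - i + n - 1) / n).toNat = q.toNat + 1 := by
          have e : N + 1 - i + n - 1 = 0 + n * (q + 1) := by linarith
          rw [e, Int.add_mul_ediv_left _ _ (by omega : n ≠ 0)]
          simp
          omega
        rw [hC1, hC2, List.range_succ, List.map_append]
        congr 1
        simp only [List.map_cons, List.map_nil]
        have hcast : ((q.toNat : Nat) : Int) = q := Int.toNat_of_nonneg hq0
        rw [hcast]
        have : i + n * q = N := by linarith
        rw [this]
      · have hiN' : i = N := by omega
        have hq0' : q = 0 := by nlinarith
        rw [pyRange_pos_lt_eq hn (by omega : i < N + 1),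
          pyRange_pos_eq_nil hn (by omega : N ≤ i)]
        have hC2 : ((N + 1 - i + n - 1) / n).toNat = 1 := by
          have e : N + 1 - i + n - 1 = 0 + n * 1 := by linarith
          rw [e, Int.add_mul_ediv_left _ _ (by omega : n ≠ 0)]
          simp
        rw [hC2]
        simp [hiN', List.range_one]
    · rw [if_neg (fun h => hsz (hiff.mp h))]
      have hspos : 0 < s := lt_of_le_of_ne hs0 (Ne.symm hsz)
      have hlt : i < N := by linarith
      rw [pyRange_pos_lt_eq hn (by omega : i < N + 1), pyRange_pos_lt_eq hn hlt]
      have e1 : N - i + n - 1 = (s - 1) + n * (q + 1) := by linarith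
      have e2 : N + 1 - i + n - 1 = s + n * (q + 1) := by linarith
      rw [e1, e2, Int.add_mul_ediv_left _ _ (by omega : n ≠ 0),
        Int.add_mul_ediv_left _ _ (by omega : n ≠ 0),
        Int.ediv_eq_zero_of_lt (show (0 : Int) ≤ s - 1 by omega) (show s - 1 < n by omega),
        Int.ediv_eq_zero_of_lt hs0 hsn]
      simp
  · rw [if_neg (show ¬ PySem.Int.mod N n = i by
      rw [hmodN, Int.emod_eq_of_lt hN (by omega)]; omega)]
    rw [pyRange_pos_eq_nil hn (by omega : N + 1 ≤ i),
      pyRange_pos_eq_nil hn (by omega : N ≤ i)]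
    simp

-- each strided row is its residue-class bucket
theorem row_eq (n : Int) (hn : 0 < n) (i : Int) (hi0 : 0 ≤ i) (hin : i < n)
    (vector : List Int) :
    (PySem.List.pyRange i (vector.length : Int) n).map
        (fun j => PySem.List.pyGetD vector j 0)
      = bucketRow vector n i := by
  induction vector using List.reverseRecOn with
  | nil =>
      simp only [List.length_nil, Nat.cast_zero]
      rw [pyRange_pos_eq_nil hn (by omega : (0 : Int) ≤ i)]
      simp [bucketRow, PySem.List.enumerate]
  | append_singleton xs x ih =>
      have hcast : (((xs ++ [x]).length : Nat) : Int) = (xs.length : Int) + 1 := by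
        simp
      rw [hcast, pyRange_step_snoc i (xs.length : Int) n hn hi0 hin (by positivity),
        List.map_append, bucketRow_append, ← ih]
      congr 1
      · apply List.map_congr_left
        intro j hj
        have hb := mem_pyRange_pos_step hn hj
        have hj0 : 0 ≤ j := by omega
        have hjlen : j < (xs.length : Int) := hb.2
        have hlen2 : j < ((xs ++ [x]).length : Int) := by
          simp
          omega
        rw [PySem.List.pyGetD_eq_getElem _ _ hj0 hlen2,
          PySem.List.pyGetD_eq_getElem _ _ hj0 hjlen,
          List.getElem_append_left (by omega)]
      · by_cases h : PySem.Int.mod (xs.length : Int) n = i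
        · simp only [if_pos h, List.map_cons, List.map_nil]
          congr 1
          rw [PySem.List.pyGetD_natCast]
          simp [List.getD_eq_getElem?_getD]
        · simp [h]

-- ===== VERDICT (by name: the statement is the Claim_ definition above) =====
theorem get_columns_form_spec : Claim_equal_get_columns_form := by
  intro vector row_size _ hpre
  unfold Spec_get_columns_form
  by_cases hpos : 0 < row_size
  · rw [a_eq_bucket row_size hpos vector]
    unfold get_columns_form_alt
    apply List.map_congr_left
    intro i hi
    have hb := (PySem.List.mem_pyRange_one).1 hi
    exact (row_eq row_size hpos i hb.1 hb.2 vector).symm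
  · have hnil : vector = [] := by
      rcases hpre with h | h
      · omega
      · exact h
    subst hnil
    have hempty : PySem.List.pyRange 0 row_size 1 = [] :=
      PySem.List.pyRange_one_eq_nil (by omega)
    simp [get_columns_form, get_columns_form_alt, hempty, PySem.List.enumerate]
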